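-- pv_equiv track=rewrite | github.com/rnaster/Today-I-Learned | 2019/1911/191108.py | func
-- ===== SOURCE A (Python) =====
-- def func(arr1, arr2):
--     n, m = len(arr1), len(arr1[0])
--     val = 0
--     for i in range(n):
--         for j in range(m):
--             if (arr1[i][j], arr2[i][j]) == (1, 1):
--                 return -1
--             elif (arr1[i][j], arr2[i][j]) == (1, 0):
--                 val += 1
--     return val
-- ===== SOURCE B (Python) =====
-- def func(arr1, arr2):
--     n, m = len(arr1), len(arr1[0])
--     freq = {}
--     for i in range(n):
--         for j in range(m):
--             key = (arr1[i][j], arr2[i][j])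
--             freq[key] = freq.get(key, 0) + 1
--     if freq.get((1, 1), 0) > 0:
--         return -1
--     return freq.get((1, 0), 0)
-- ===== Notes on version B (the rewrite author's own statement) =====
-- stated objective: alternative
-- what changed: Instead of an interleaved scan with an early return and a running counter, B builds a frequency dictionary (a hand-rolled Counter) over all (arr1 cell, arr2 cell) value pairs in one tabulating pass and then answers by two lookups: -1 if the key (1,1) occurred, else the multiplicity of (1,0).
-- outside the precondition, e.g. on func([[1, 1], [9]], [[1, 1], [8]]): A returns -1, B raises IndexError
import Mathlib
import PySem

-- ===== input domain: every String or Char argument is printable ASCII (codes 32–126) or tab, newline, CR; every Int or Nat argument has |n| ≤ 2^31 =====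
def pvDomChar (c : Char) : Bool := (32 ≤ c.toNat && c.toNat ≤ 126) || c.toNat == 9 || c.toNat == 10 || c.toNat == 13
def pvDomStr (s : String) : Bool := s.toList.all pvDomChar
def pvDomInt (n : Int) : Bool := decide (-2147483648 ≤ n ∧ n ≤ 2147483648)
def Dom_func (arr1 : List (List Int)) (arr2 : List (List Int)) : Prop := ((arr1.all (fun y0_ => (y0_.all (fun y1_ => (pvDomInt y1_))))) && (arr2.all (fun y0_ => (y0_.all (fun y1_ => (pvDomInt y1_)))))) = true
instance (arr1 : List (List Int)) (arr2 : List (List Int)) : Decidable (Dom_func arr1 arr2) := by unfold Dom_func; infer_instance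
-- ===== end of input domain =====

-- B replaces A's interleaved early-return scan by one tabulating pass that builds a frequency
-- dictionary of the cell-value pairs, answered by two lookups (alternative decomposition, same cost).

-- ===== PORT A =====
-- inner loop: for j in range(m), reading arr1[i][j] / arr2[i][j]; early return -1 modelled as .error
def funcGo2 (r1 r2 : List Int) : List Int → Int → Except Int Int
  | [], val => .ok val
  | j :: js, val =>
    if PySem.List.pyGetD r1 j 0 = 1 ∧ PySem.List.pyGetD r2 j 0 = 1 then .error (-1)
    else if PySem.List.pyGetD r1 j 0 = 1 ∧ PySem.List.pyGetD r2 j 0 = 0 then funcGo2 r1 r2 js (val + 1)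
    else funcGo2 r1 r2 js val

-- outer loop: for i in range(n), fetching arr1[i] / arr2[i]
def funcGo1 (arr1 arr2 : List (List Int)) (m : Int) : List Int → Int → Except Int Int
  | [], val => .ok val
  | i :: is, val =>
    match funcGo2 (PySem.List.pyGetD arr1 i []) (PySem.List.pyGetD arr2 i []) (PySem.List.pyRange 0 m 1) val with
    | .error e => .error e
    | .ok v => funcGo1 arr1 arr2 m is v

def func (arr1 : List (List Int)) (arr2 : List (List Int)) : Int :=
  let n : Int := arr1.length
  let m : Int := (PySem.List.pyGetD arr1 0 []).length
  match funcGo1 arr1 arr2 m (PySem.List.pyRange 0 n 1) 0 with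
  | .error e => e
  | .ok v => v

-- ===== PORT B =====
-- one tabulating pass building freq[(a, b)] += 1, then two lookups
def func_alt (arr1 : List (List Int)) (arr2 : List (List Int)) : Int :=
  let n : Int := arr1.length
  let m : Int := (PySem.List.pyGetD arr1 0 []).length
  let freq : PySem.Dict (Int × Int) Int :=
    (PySem.List.pyRange 0 n 1).foldl (fun d i =>
      (PySem.List.pyRange 0 m 1).foldl (fun d j =>
        let key := (PySem.List.pyGetD (PySem.List.pyGetD arr1 i []) j 0,
                    PySem.List.pyGetD (PySem.List.pyGetD arr2 i []) j 0)
        d.insert key (d.getD key 0 + 1)) d) PySem.Dict.empty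
  if freq.getD (1, 1) 0 > 0 then -1 else freq.getD (1, 0) 0

-- ===== PRECONDITION & SPEC =====
-- Pre_func admits exactly the inputs where A's scan raises no IndexError: arr1 nonempty, and
-- (unless m = len(arr1[0]) = 0, when no cell is ever accessed) every access arr1[i][j], arr2[i][j]
-- (i < len(arr1), j < m) in range. It excludes the inputs where a (1,1) cell precedes the first
-- out-of-range access, on which A's early -1 is an artefact of its scan order while B (which scans
-- every cell) raises IndexError.
def Pre_func (arr1 : List (List Int)) (arr2 : List (List Int)) : Prop :=
  arr1 ≠ [] ∧
  (arr1.headI.length = 0 ∨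
    (arr1.length ≤ arr2.length ∧
     (∀ r ∈ arr1, arr1.headI.length ≤ r.length) ∧
     (∀ p ∈ arr1.zip arr2, arr1.headI.length ≤ p.2.length)))
instance (arr1 : List (List Int)) (arr2 : List (List Int)) : Decidable (Pre_func arr1 arr2) := by
  unfold Pre_func; infer_instance

def pvWitness_func : List (List Int) × List (List Int) := ([[1, 0], [0, 1]], [[0, 0], [0, 0]])

def Spec_func (arr1 : List (List Int)) (arr2 : List (List Int)) (out : Int) : Prop := out = func_alt arr1 arr2
instance (arr1 : List (List Int)) (arr2 : List (List Int)) (out : Int) : Decidable (Spec_func arr1 arr2 out) := by unfold Spec_func; infer_instance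

-- ===== CLAIM =====
def Claim_equal_func : Prop := ∀ (arr1 : List (List Int)) (arr2 : List (List Int)), Dom_func arr1 arr2 → Pre_func arr1 arr2 → Spec_func arr1 arr2 (func arr1 arr2)

-- ===== LEMMAS AND PROOFS =====

-- the pair of values A and B both read at cell (i, j)
def pvKey (arr1 arr2 : List (List Int)) (i j : Int) : Int × Int :=
  (PySem.List.pyGetD (PySem.List.pyGetD arr1 i []) j 0,
   PySem.List.pyGetD (PySem.List.pyGetD arr2 i []) j 0)

-- the row-major list of cell-value pairs scanned over index lists is, js
def pvCells (arr1 arr2 : List (List Int)) (is js : List Int) : List (Int × Int) :=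
  is.flatMap (fun i => js.map (pvKey arr1 arr2 i))

-- A's inner loop, characterised over an arbitrary index list
theorem pvGo2_char (r1 r2 : List Int) (js : List Int) :
    ∀ val : Int,
    funcGo2 r1 r2 js val =
      (if (js.map (fun j => (PySem.List.pyGetD r1 j 0, PySem.List.pyGetD r2 j 0))).any
            (fun p => p.1 == 1 && p.2 == 1) then .error (-1)
       else .ok (val + ((js.map (fun j => (PySem.List.pyGetD r1 j 0, PySem.List.pyGetD r2 j 0))).countP
            (fun p => p.1 == 1 && p.2 == 0) : Int))) := by
  induction js with
  | nil => intro val; simp [funcGo2]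
  | cons j js ih =>
    intro val
    simp only [funcGo2, List.map_cons, List.any_cons, List.countP_cons]
    by_cases h11 : PySem.List.pyGetD r1 j 0 = 1 ∧ PySem.List.pyGetD r2 j 0 = 1
    · simp [h11]
    · by_cases h10 : PySem.List.pyGetD r1 j 0 = 1 ∧ PySem.List.pyGetD r2 j 0 = 0
      · rw [if_neg h11, if_pos h10, ih (val + 1)]
        obtain ⟨hx, hy⟩ := h10
        simp only [hx, hy]
        norm_num
        split_ifs with h
        · simp
        · simp; omega
      · rw [if_neg h11, if_neg h10, ih val]
        by_cases hx1 : PySem.List.pyGetD r1 j 0 = 1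
        · have hy1 : PySem.List.pyGetD r2 j 0 ≠ 1 := fun h => h11 ⟨hx1, h⟩
          have hy0 : PySem.List.pyGetD r2 j 0 ≠ 0 := fun h => h10 ⟨hx1, h⟩
          simp [hx1, hy1, hy0]
        · simp [hx1]

-- A's outer loop, characterised over an arbitrary index list
theorem pvGo1_char (arr1 arr2 : List (List Int)) (m : Int) (is : List Int) :
    ∀ val : Int,
    funcGo1 arr1 arr2 m is val =
      (if (pvCells arr1 arr2 is (PySem.List.pyRange 0 m 1)).any (fun p => p.1 == 1 && p.2 == 1) then
        .error (-1)
       else .ok (val + ((pvCells arr1 arr2 is (PySem.List.pyRange 0 m 1)).countP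
            (fun p => p.1 == 1 && p.2 == 0) : Int))) := by
  induction is with
  | nil => intro val; simp [funcGo1, pvCells]
  | cons i is ih =>
    intro val
    simp only [funcGo1]
    rw [pvGo2_char]
    have hmap : (fun j => (PySem.List.pyGetD (PySem.List.pyGetD arr1 i []) j 0,
        PySem.List.pyGetD (PySem.List.pyGetD arr2 i []) j 0)) = pvKey arr1 arr2 i := rfl
    rw [hmap]
    simp only [pvCells, List.flatMap_cons, List.any_append, List.countP_append]
    by_cases hany : ((PySem.List.pyRange 0 m 1).map (pvKey arr1 arr2 i)).any
        (fun p => p.1 == 1 && p.2 == 1) = true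
    · rw [if_pos hany]
      simp [hany]
    · rw [if_neg hany]
      dsimp only
      rw [ih]
      simp only [pvCells]
      simp only [Bool.not_eq_true] at hany
      simp only [hany, Bool.false_or]
      split_ifs with h
      · rfl
      · congr 1
        push_cast
        ring

-- nested counting foldl over index lists = plain counting foldl over the flattened cells list
theorem pvFoldl_nested (g : Int → List (Int × Int)) (is : List Int)
    (step : PySem.Dict (Int × Int) Int → Int × Int → PySem.Dict (Int × Int) Int) :
    ∀ d : PySem.Dict (Int × Int) Int,
    is.foldl (fun d i => (g i).foldl step d) d = (is.flatMap g).foldl step d := by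
  induction is with
  | nil => intro d; simp
  | cons i is ih => intro d; simp [List.foldl_append, ih]

-- B's dictionary is the Counter of the cells list
theorem pvFreq_eq_counter (arr1 arr2 : List (List Int)) (n m : Int) :
    (PySem.List.pyRange 0 n 1).foldl (fun d i =>
      (PySem.List.pyRange 0 m 1).foldl (fun d j =>
        let key := (PySem.List.pyGetD (PySem.List.pyGetD arr1 i []) j 0,
                    PySem.List.pyGetD (PySem.List.pyGetD arr2 i []) j 0)
        d.insert key (d.getD key 0 + 1)) d) (PySem.Dict.empty : PySem.Dict (Int × Int) Int) =
    PySem.Dict.counter (pvCells arr1 arr2 (PySem.List.pyRange 0 n 1) (PySem.List.pyRange 0 m 1)) := by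
  have hinner : ∀ (i : Int) (d : PySem.Dict (Int × Int) Int),
      (PySem.List.pyRange 0 m 1).foldl (fun d j =>
        let key := (PySem.List.pyGetD (PySem.List.pyGetD arr1 i []) j 0,
                    PySem.List.pyGetD (PySem.List.pyGetD arr2 i []) j 0)
        d.insert key (d.getD key 0 + 1)) d =
      ((PySem.List.pyRange 0 m 1).map (pvKey arr1 arr2 i)).foldl
        (fun d key => d.insert key (d.getD key 0 + 1)) d := by
    intro i d
    rw [List.foldl_map]
    rfl
  have heq : (fun (d : PySem.Dict (Int × Int) Int) (i : Int) =>
      (PySem.List.pyRange 0 m 1).foldl (fun d j =>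
        let key := (PySem.List.pyGetD (PySem.List.pyGetD arr1 i []) j 0,
                    PySem.List.pyGetD (PySem.List.pyGetD arr2 i []) j 0)
        d.insert key (d.getD key 0 + 1)) d)
    = (fun (d : PySem.Dict (Int × Int) Int) (i : Int) =>
      ((PySem.List.pyRange 0 m 1).map (pvKey arr1 arr2 i)).foldl
        (fun d key => d.insert key (d.getD key 0 + 1)) d) :=
    funext fun d => funext fun i => hinner i d
  rw [heq, pvFoldl_nested]
  exact PySem.Dict.foldl_insert_getD_add_one_eq_counter _

-- count of a literal pair = countP of the componentwise boolean test
theorem pvCount_eq_countP (L : List (Int × Int)) (a b : Int) :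
    L.count (a, b) = L.countP (fun p => p.1 == a && p.2 == b) := by
  unfold List.count
  apply List.countP_congr
  intro p _
  obtain ⟨x, y⟩ := p
  constructor <;> intro h <;> simp_all [Prod.ext_iff]

-- ===== VERDICT (by name: the statement is the Claim_ definition above) =====
theorem func_spec : Claim_equal_func := by
  intro arr1 arr2 _ _
  show func arr1 arr2 = func_alt arr1 arr2
  unfold func func_alt
  dsimp only
  rw [pvGo1_char, pvFreq_eq_counter]
  set L := pvCells arr1 arr2 (PySem.List.pyRange 0 (arr1.length : Int) 1)
    (PySem.List.pyRange 0 ((PySem.List.pyGetD arr1 0 []).length : Int) 1) with hL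
  rw [PySem.Dict.getD_counter, PySem.Dict.getD_counter]
  rw [pvCount_eq_countP, pvCount_eq_countP]
  by_cases hany : L.any (fun p => p.1 == 1 && p.2 == 1) = true
  · have hpos : 0 < L.countP (fun p => p.1 == 1 && p.2 == 1) := by
      obtain ⟨p, hp, hpp⟩ := List.any_eq_true.mp hany
      exact List.countP_pos_iff.mpr ⟨p, hp, hpp⟩
    rw [if_pos hany, if_pos (by exact_mod_cast hpos)]
  · have hz : L.countP (fun p => p.1 == 1 && p.2 == 1) = 0 := by
      rw [List.countP_eq_zero]
      intro p hp hpp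
      exact hany (List.any_eq_true.mpr ⟨p, hp, hpp⟩)
    rw [if_neg hany, if_neg (by simp [hz])]
    simp
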